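-- pv_equiv track=rewrite | github.com/ioneuk/codejam | codejam_2022/qualification/d1000000.py | solve
-- ===== SOURCE A (Python) =====
-- def solve(N, si):
--     si = sorted(si)
--     counter = 0
--     for num in si:
--         if num < counter + 1:
--             continue
--         counter += 1
--     return counter
-- ===== SOURCE B (Python) =====
-- def solve(N, si):
--     # Count multiplicities once, then walk distinct values in ascending order,
--     # accepting per value v as many copies as keep v >= c+1: min(m, max(0, v - c)).
--     counts = {}
--     for x in si:
--         counts[x] = counts.get(x, 0) + 1
--     c = 0
--     for v in sorted(counts):
--         c += min(counts[v], max(0, v - c))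
--     return c
-- ===== Notes on version B (the rewrite author's own statement) =====
-- stated objective: alternative
-- what changed: Replaces the element-by-element greedy over the fully sorted list by a multiplicity dict: distinct values are visited once in ascending order and the counter jumps by min(count, max(0, v - c)) per group.
import Mathlib
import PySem

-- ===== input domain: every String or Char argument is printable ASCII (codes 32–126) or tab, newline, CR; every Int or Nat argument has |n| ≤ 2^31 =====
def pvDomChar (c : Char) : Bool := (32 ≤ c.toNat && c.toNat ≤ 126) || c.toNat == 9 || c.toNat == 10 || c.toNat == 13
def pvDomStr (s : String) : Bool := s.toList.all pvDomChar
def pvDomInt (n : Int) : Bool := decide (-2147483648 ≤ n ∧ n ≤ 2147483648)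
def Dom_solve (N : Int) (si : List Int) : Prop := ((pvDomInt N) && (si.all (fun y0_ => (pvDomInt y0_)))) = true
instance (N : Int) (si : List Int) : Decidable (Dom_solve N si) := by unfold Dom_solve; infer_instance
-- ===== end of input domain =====

-- B replaces A's element-by-element greedy over the fully sorted list by a multiplicity
-- dict walked over its distinct keys in ascending order (objective: alternative).

-- ===== PORT A =====
-- sort, then one pass: counter += 1 for each num with num >= counter + 1
def solve (N : Int) (si : List Int) : Int :=
  (PySem.List.sorted si (fun x => x) false).foldl
    (fun counter num => if num < counter + 1 then counter else counter + 1) 0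

-- ===== PORT B =====
-- build the multiplicity dict, then walk its keys in ascending order
def solve_alt (N : Int) (si : List Int) : Int :=
  let counts : PySem.Dict Int Int :=
    si.foldl (fun d x => d.insert x (d.getD x 0 + 1)) PySem.Dict.empty
  (PySem.List.sorted counts.keys (fun x => x) false).foldl
    (fun c v => c + min (counts.getD v 0) (max 0 (v - c))) 0

-- ===== PRECONDITION & SPEC =====
def Spec_solve (N : Int) (si : List Int) (out : Int) : Prop := out = solve_alt N si
instance (N : Int) (si : List Int) (out : Int) : Decidable (Spec_solve N si out) := by unfold Spec_solve; infer_instance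

-- ===== CLAIM (what is proved, stated in full; the proofs are below) =====
def Claim_equal_solve : Prop := ∀ (N : Int) (si : List Int), Dom_solve N si → Spec_solve N si (solve N si)

-- ===== LEMMAS AND PROOFS =====

-- A's step applied to m copies of v: the counter jumps by min m (max 0 (v - c))
theorem foldA_replicate (m : Nat) (v c : Int) :
    (List.replicate m v).foldl
      (fun counter num => if num < counter + 1 then counter else counter + 1) c
      = c + min (m : Int) (max 0 (v - c)) := by
  induction m generalizing c with
  | zero => simp
  | succ m ih =>
    rw [List.replicate_succ, List.foldl_cons, ih]
    push_cast
    split_ifs with h <;> omega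

-- grouping si by a nodup key list covering si reproduces si up to permutation
theorem flatMap_replicate_count_perm (ks si : List Int) (hnd : ks.Nodup)
    (hmem : ∀ x ∈ si, x ∈ ks) :
    (ks.flatMap (fun v => List.replicate (si.count v) v)).Perm si := by
  induction ks generalizing si with
  | nil =>
    have : si = [] := by
      cases si with
      | nil => rfl
      | cons a t => exact absurd (hmem a (List.mem_cons_self)) (List.not_mem_nil)
    simp [this]
  | cons v ks ih =>
    have hnd' : ks.Nodup := hnd.of_cons
    have hv : v ∉ ks := by simp [List.nodup_cons] at hnd; exact hnd.1
    rw [List.flatMap_cons]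
    have hflt : (ks.flatMap (fun w => List.replicate (si.count w) w))
        = ks.flatMap (fun w => List.replicate ((si.filter (fun x => !(x == v))).count w) w) := by
      apply List.flatMap_congr
      intro w hw
      have hwv : w ≠ v := fun h => hv (h ▸ hw)
      rw [List.count_filter (by simp [hwv])]
    have ihp := ih (si.filter (fun x => !(x == v))) hnd' (by
      intro x hx
      simp only [List.mem_filter] at hx
      have := hmem x hx.1
      simp only [List.mem_cons] at this
      rcases this with h | h
      · exact absurd h (by simpa using hx.2)
      · exact h)
    refine List.Perm.trans ?_ (List.filter_append_perm (· == v) si)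
    rw [List.filter_beq, hflt]
    exact ihp.append_left _

-- the grouped list is sorted when the keys are strictly increasing
theorem flatMap_replicate_pairwise (ks si : List Int) (hp : ks.Pairwise (· < ·)) :
    (ks.flatMap (fun v => List.replicate (si.count v) v)).Pairwise (· ≤ ·) := by
  induction ks with
  | nil => simp
  | cons v ks ih =>
    rw [List.flatMap_cons, List.pairwise_append]
    refine ⟨List.pairwise_replicate_of_refl, ih hp.of_cons, ?_⟩
    intro a ha b hb
    have hav := List.eq_of_mem_replicate ha
    have : ∃ w ∈ ks, b ∈ List.replicate (si.count w) w := by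
      simpa using hb
    obtain ⟨w, hw, hbw⟩ := this
    have := List.eq_of_mem_replicate hbw
    subst hav this
    exact le_of_lt (List.rel_of_pairwise_cons hp hw)

-- folding A's step over the grouped list = folding the per-group jump over the keys
theorem foldA_flatMap (ks si : List Int) (c : Int) :
    (ks.flatMap (fun v => List.replicate (si.count v) v)).foldl
      (fun counter num => if num < counter + 1 then counter else counter + 1) c
      = ks.foldl (fun c v => c + min ((si.count v : Int)) (max 0 (v - c))) c := by
  induction ks generalizing c with
  | nil => rfl
  | cons v ks ih =>
    rw [List.flatMap_cons, List.foldl_append, foldA_replicate, List.foldl_cons, ih]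

-- sorted(si) is exactly the ascending distinct keys expanded by their multiplicities
theorem sorted_eq_flatMap (si : List Int) :
    PySem.List.sorted si (fun x => x) false
      = (PySem.List.sorted (PySem.Set.ofList si) (fun x => x) false).flatMap
          (fun v => List.replicate (si.count v) v) := by
  have hKperm : (PySem.List.sorted (PySem.Set.ofList si) (fun x => x) false).Perm
      (PySem.Set.ofList si) := PySem.List.sorted_perm _ _ _
  have hKnd : (PySem.List.sorted (PySem.Set.ofList si) (fun x => x) false).Nodup :=
    hKperm.nodup_iff.mpr (PySem.Set.nodup_ofList si)
  have hKmem : ∀ x ∈ si, x ∈ PySem.List.sorted (PySem.Set.ofList si) (fun x => x) false := by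
    intro x hx
    rw [PySem.List.mem_sorted]
    exact (PySem.Set.mem_ofList _ _).mpr hx
  exact PySem.List.sorted_id_eq_of_perm_of_pairwise si _
    (flatMap_replicate_count_perm _ si hKnd hKmem)
    (flatMap_replicate_pairwise _ si (PySem.List.sorted_ofList_pairwise_lt si))

-- ===== VERDICT (by name: the statement is the Claim_ definition above) =====
theorem solve_spec : Claim_equal_solve := by
  intro N si _
  show solve N si = solve_alt N si
  simp only [solve, solve_alt, PySem.Dict.foldl_insert_getD_add_one_eq_counter,
    PySem.Dict.keys_counter, PySem.Dict.getD_counter]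
  rw [sorted_eq_flatMap, foldA_flatMap]
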